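-- pv_equiv track=rewrite | github.com/deepdik/inferneo | benchmarks/runners/comparison_runner.py | _generate_test_prompts
-- ===== SOURCE A (Python) =====
-- from typing import List, Dict, Any, Optional
--
-- def _generate_test_prompts(count: int) -> List[str]:
--     """Generate test prompts."""
--     prompts = [
--         "The quick brown fox jumps over the lazy dog.",
--         "In a hole in the ground there lived a hobbit.",
--         "It was the best of times, it was the worst of times.",
--         "To be or not to be, that is the question.",
--         "All happy families are alike; each unhappy family is unhappy in its own way."
--     ]
--
--     # Repeat prompts to get desired count
--     result = []
--     for i in range(count):
--         result.append(prompts[i % len(prompts)])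
--
--     return result
-- ===== SOURCE B (Python) =====
-- def _generate_test_prompts(count: int) -> list:
--     """Generate test prompts."""
--     prompts = [
--         "The quick brown fox jumps over the lazy dog.",
--         "In a hole in the ground there lived a hobbit.",
--         "It was the best of times, it was the worst of times.",
--         "To be or not to be, that is the question.",
--         "All happy families are alike; each unhappy family is unhappy in its own way."
--     ]
--     k = count // len(prompts) + 1
--     return (prompts * k)[:count]
-- ===== Notes on version B (the rewrite author's own statement) =====
-- stated objective: simpler
-- what changed: Replaces the per-element loop with i % len indexing by tiling the prompt list (prompts * (count//len + 1)) and truncating with a slice.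
import Mathlib
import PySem

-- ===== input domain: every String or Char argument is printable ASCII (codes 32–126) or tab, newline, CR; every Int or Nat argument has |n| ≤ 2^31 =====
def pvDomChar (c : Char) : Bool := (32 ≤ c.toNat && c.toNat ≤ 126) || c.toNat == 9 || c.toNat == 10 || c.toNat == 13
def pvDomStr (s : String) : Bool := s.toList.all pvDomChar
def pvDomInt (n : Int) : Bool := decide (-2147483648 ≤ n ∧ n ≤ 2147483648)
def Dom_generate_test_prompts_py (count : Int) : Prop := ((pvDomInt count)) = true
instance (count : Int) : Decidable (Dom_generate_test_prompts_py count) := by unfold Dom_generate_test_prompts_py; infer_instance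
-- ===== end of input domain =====

-- B tiles the prompt list and truncates with a slice instead of appending prompts[i % len] one at a time ('simpler').

-- ===== PORT A =====

-- A's local 'prompts' list
def pvPromptsA : List String := [
  "The quick brown fox jumps over the lazy dog.",
  "In a hole in the ground there lived a hobbit.",
  "It was the best of times, it was the worst of times.",
  "To be or not to be, that is the question.",
  "All happy families are alike; each unhappy family is unhappy in its own way."]

def generate_test_prompts_py (count : Int) : List String :=
  (PySem.List.pyRange 0 count 1).foldl
    (fun result i => result ++ [PySem.List.pyGetD pvPromptsA (PySem.Int.mod i (pvPromptsA.length : Int)) ""])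
    []

-- ===== PORT B =====

-- B's local 'prompts' list
def pvPromptsB : List String := [
  "The quick brown fox jumps over the lazy dog.",
  "In a hole in the ground there lived a hobbit.",
  "It was the best of times, it was the worst of times.",
  "To be or not to be, that is the question.",
  "All happy families are alike; each unhappy family is unhappy in its own way."]

-- Python 'xs * k' (k ≤ 0 gives [])
def pvListMul {α : Type} (xs : List α) (k : Int) : List α :=
  (List.replicate k.toNat xs).flatten

def generate_test_prompts_py_alt (count : Int) : List String :=
  let k := PySem.Int.floordiv count (pvPromptsB.length : Int) + 1
  PySem.List.slice (pvListMul pvPromptsB k) none (some count)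

-- ===== PRECONDITION & SPEC =====
def Spec_generate_test_prompts_py (count : Int) (out : List String) : Prop := out = generate_test_prompts_py_alt count
instance (count : Int) (out : List String) : Decidable (Spec_generate_test_prompts_py count out) := by unfold Spec_generate_test_prompts_py; infer_instance

-- ===== CLAIM (what is proved, stated in full; the proofs are below) =====
def Claim_equal_generate_test_prompts_py : Prop := ∀ (count : Int), Dom_generate_test_prompts_py count → Spec_generate_test_prompts_py count (generate_test_prompts_py count)

-- ===== LEMMAS AND PROOFS =====

theorem pvPromptsB_eq : pvPromptsB = pvPromptsA := by decide

-- A's append-loop is a map over the range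
theorem pvA_eq_map (count : Int) :
    generate_test_prompts_py count =
      (List.range count.toNat).map (fun j => pvPromptsA[j % 5]!) := by
  unfold generate_test_prompts_py
  rw [PySem.List.pyRange_one, PySem.List.foldl_append_singleton_eq_map, List.map_map]
  simp only [List.nil_append, sub_zero]
  refine List.map_congr_left (fun j hj => ?_)
  have hm : PySem.Int.mod (0 + (j : Int)) 5 = ((j % 5 : Nat) : Int) := by
    simp
  have hlt : j % 5 < pvPromptsA.length := by
    have h5 : pvPromptsA.length = 5 := by decide
    rw [h5]; exact Nat.mod_lt j (by omega)
  simp only [Function.comp, show (pvPromptsA.length : Int) = 5 from by decide, hm,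
    PySem.List.pyGetD_natCast]
  simp [List.getD_eq_getElem?_getD, List.getElem?_eq_getElem hlt, List.getElem!_eq_getElem?_getD]

theorem flatten_replicate_getElem? {α : Type} (xs : List α) (m j : Nat)
    (hj : j < m * xs.length) :
    (List.replicate m xs).flatten[j]? = xs[j % xs.length]? := by
  induction m generalizing j with
  | zero => simp at hj
  | succ m ih =>
    rw [Nat.succ_mul] at hj
    rw [List.replicate_succ, List.flatten_cons]
    by_cases h : j < xs.length
    · rw [List.getElem?_append_left h, Nat.mod_eq_of_lt h]
    · rw [List.getElem?_append_right (by omega)]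
      rw [ih (j - xs.length) (by omega)]
      rw [Nat.mod_eq_sub_mod (Nat.le_of_not_lt h)]

-- ===== VERDICT (by name: the statement is the Claim_ definition above) =====
theorem generate_test_prompts_py_spec : Claim_equal_generate_test_prompts_py := by
  intro count _
  unfold Spec_generate_test_prompts_py generate_test_prompts_py_alt
  rw [pvPromptsB_eq]
  show generate_test_prompts_py count =
    PySem.List.slice (pvListMul pvPromptsA (PySem.Int.floordiv count (pvPromptsA.length : Int) + 1))
      none (some count)
  by_cases hc : count ≤ 0
  · have hA : generate_test_prompts_py count = [] := by
      unfold generate_test_prompts_py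
      rw [PySem.List.pyRange_one_eq_nil hc]; rfl
    by_cases h0 : count = 0
    · subst h0
      rw [hA, show ((0:Int) = ((0:Nat):Int)) from rfl, PySem.List.slice_to_natCast]
      simp
    · have hfd : PySem.Int.floordiv count (pvPromptsA.length : Int) + 1 ≤ 0 := by
        rw [show (pvPromptsA.length : Int) = 5 from by decide]
        have hdm := PySem.Int.floordiv_mul_add_mod count 5
        have h1 : 0 ≤ PySem.Int.mod count 5 := PySem.Int.mod_nonneg count (by omega)
        have h2 : PySem.Int.mod count 5 < 5 := PySem.Int.mod_lt count (by omega)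
        omega
      have hmul : pvListMul pvPromptsA (PySem.Int.floordiv count (pvPromptsA.length : Int) + 1) = [] := by
        unfold pvListMul
        rw [show (PySem.Int.floordiv count (pvPromptsA.length : Int) + 1).toNat = 0 from by omega]
        rfl
      rw [hmul, hA]
      simp [PySem.List.slice]
  · push_neg at hc
    obtain ⟨n, rfl⟩ := Int.eq_ofNat_of_zero_le hc.le
    have hlenA : pvPromptsA.length = 5 := by decide
    have hfd : PySem.Int.floordiv ((n : Nat) : Int) (pvPromptsA.length : Int) + 1
        = ((n / 5 + 1 : Nat) : Int) := by
      rw [hlenA, PySem.Int.floordiv_natCast]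
      push_cast; ring
    rw [hfd]
    unfold pvListMul
    rw [Int.toNat_natCast, PySem.List.slice_to_natCast, pvA_eq_map, Int.toNat_natCast]
    apply List.ext_getElem?
    intro j
    by_cases hj : j < n
    · rw [List.getElem?_take_of_lt hj,
        flatten_replicate_getElem? pvPromptsA _ j (by rw [hlenA]; omega),
        List.getElem?_map, List.getElem?_range hj, hlenA]
      have hlt : j % 5 < pvPromptsA.length := by rw [hlenA]; exact Nat.mod_lt j (by omega)
      simp [List.getElem?_eq_getElem hlt, List.getElem!_eq_getElem?_getD]
    · have h1 : ((List.range n).map (fun j => pvPromptsA[j % 5]!)).length ≤ j := by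
        simp; omega
      have h2 : ((List.replicate (n / 5 + 1) pvPromptsA).flatten.take n).length ≤ j := by
        rw [List.length_take]; omega
      rw [List.getElem?_eq_none h1, List.getElem?_eq_none h2]
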